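-- pv_equiv track=rewrite | github.com/Nursat2022/PP2_LABS | lab3/Function1.py | con_007
-- ===== SOURCE A (Python) =====
-- def con_007(arr):
--     l = []
--     for i in arr:
--         if i == 0 or i == 7:
--             l.append(i)
--
--     for i in range(len(l)-2):
--         if l[i] == 0 and l[i+1] == 0 and l[i+2] == 7:
--             return True
--
--     return False
-- ===== SOURCE B (Python) =====
-- def con_007(arr):
--     zeros = 0
--     for x in arr:
--         if x == 0:
--             zeros += 1
--         elif x == 7:
--             if zeros >= 2:
--                 return True
--             zeros = 0
--     return False
-- ===== Notes on version B (the rewrite author's own statement) =====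
-- stated objective: simpler
-- what changed: Replaced the build-a-filtered-list-then-scan-windows two-pass algorithm by a single pass over arr that maintains a count of consecutive zeros within the 0/7 subsequence, returning True at a 7 preceded by at least two such zeros.
import Mathlib
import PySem

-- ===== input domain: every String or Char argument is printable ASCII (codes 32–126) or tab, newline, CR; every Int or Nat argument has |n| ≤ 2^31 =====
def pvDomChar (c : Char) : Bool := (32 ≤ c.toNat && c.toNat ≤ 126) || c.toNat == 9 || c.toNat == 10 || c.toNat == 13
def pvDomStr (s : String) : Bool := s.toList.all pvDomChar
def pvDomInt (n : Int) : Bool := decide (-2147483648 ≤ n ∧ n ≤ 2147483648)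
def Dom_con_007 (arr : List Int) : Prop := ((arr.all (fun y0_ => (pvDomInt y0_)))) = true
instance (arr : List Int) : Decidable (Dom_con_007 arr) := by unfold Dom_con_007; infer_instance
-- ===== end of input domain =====

-- B replaces A's two passes (build the filtered 0/7 list, then scan index windows for 0,0,7)
-- by a single pass over arr counting consecutive zeros within the 0/7 subsequence: simpler.

-- ===== PORT A =====
-- 'for i in range(len(l)-2): if l[i]==0 and l[i+1]==0 and l[i+2]==7: return True' (indices always in range)
def con007LoopA (l : List Int) : List Int → Bool
  | [] => false
  | i :: rest =>
    if PySem.List.pyGet? l i = some 0 ∧ PySem.List.pyGet? l (i + 1) = some 0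
        ∧ PySem.List.pyGet? l (i + 2) = some 7 then true
    else con007LoopA l rest

def con_007 (arr : List Int) : Bool :=
  let l := arr.foldl (fun acc i => if i = 0 ∨ i = 7 then acc ++ [i] else acc) []
  con007LoopA l (PySem.List.pyRange 0 ((l.length : Int) - 2) 1)

-- ===== PORT B =====
def con007GoB : List Int → Int → Bool
  | [], _ => false
  | x :: rest, zeros =>
    if x = 0 then con007GoB rest (zeros + 1)
    else if x = 7 then (if zeros ≥ 2 then true else con007GoB rest 0)
    else con007GoB rest zeros

def con_007_alt (arr : List Int) : Bool := con007GoB arr 0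

-- ===== PRECONDITION & SPEC =====
def Spec_con_007 (arr : List Int) (out : Bool) : Prop := out = con_007_alt arr
instance (arr : List Int) (out : Bool) : Decidable (Spec_con_007 arr out) := by unfold Spec_con_007; infer_instance

-- ===== CLAIM (what is proved, stated in full; the proofs are below) =====
def Claim_equal_con_007 : Prop := ∀ (arr : List Int), Dom_con_007 arr → Spec_con_007 arr (con_007 arr)

-- ===== LEMMAS AND PROOFS =====

-- structural 0,0,7-window scan, the common reference point of both proofs
def con007Scan : List Int → Bool
  | a :: b :: c :: t => if a = 0 ∧ b = 0 ∧ c = 7 then true else con007Scan (b :: c :: t)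
  | _ => false

theorem con007Scan_short (l : List Int) (h : l.length < 3) : con007Scan l = false := by
  match l, h with
  | [], _ => rfl
  | [_], _ => rfl
  | [_, _], _ => rfl

-- A's index loop from index k computes the window scan of the k-suffix
theorem con007LoopA_eq_scan (n : Nat) : ∀ (l : List Int) (k : Nat), l.length - k ≤ n →
    con007LoopA l (PySem.List.pyRange (k : Int) ((l.length : Int) - 2) 1) = con007Scan (l.drop k) := by
  induction n with
  | zero =>
    intro l k h
    have hk : l.length ≤ k := by omega
    rw [PySem.List.pyRange_one_eq_nil (by omega)]
    rw [List.drop_eq_nil_of_le hk]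
    rfl
  | succ n ih =>
    intro l k h
    by_cases hlt : k + 2 < l.length
    · rw [PySem.List.pyRange_one_cons (by omega)]
      have e0 : PySem.List.pyGet? l (k : Int) = some l[k] :=
        PySem.List.pyGet?_ofNat l k (by omega)
      have e1 : ((k : Int) + 1) = ((k + 1 : Nat) : Int) := by omega
      have e2 : ((k : Int) + 2) = ((k + 2 : Nat) : Int) := by omega
      have g1 : PySem.List.pyGet? l ((k : Int) + 1) = some l[k + 1] := by
        rw [e1]; exact PySem.List.pyGet?_ofNat l (k + 1) (by omega)
      have g2 : PySem.List.pyGet? l ((k : Int) + 2) = some l[k + 2] := by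
        rw [e2]; exact PySem.List.pyGet?_ofNat l (k + 2) (by omega)
      have hdrop : l.drop k = l[k] :: l[k + 1] :: l[k + 2] :: l.drop (k + 3) := by
        have h1 : l.drop k = l[k] :: l.drop (k + 1) := List.drop_eq_getElem_cons (by omega)
        have h2 : l.drop (k + 1) = l[k + 1] :: l.drop (k + 2) := List.drop_eq_getElem_cons (by omega)
        have h3 : l.drop (k + 2) = l[k + 2] :: l.drop (k + 3) := List.drop_eq_getElem_cons (by omega)
        rw [h1, h2, h3]
      rw [con007LoopA, e0, g1, g2, hdrop, con007Scan]
      simp only [Option.some.injEq]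
      by_cases hC : l[k] = 0 ∧ l[k + 1] = 0 ∧ l[k + 2] = 7
      · rw [if_pos hC, if_pos hC]
      · rw [if_neg hC, if_neg hC]
        have hd : l.drop (k + 1) = l[k + 1] :: l[k + 2] :: l.drop (k + 3) := by
          rw [List.drop_eq_getElem_cons (show k + 1 < l.length by omega),
              List.drop_eq_getElem_cons (show k + 2 < l.length by omega)]
        rw [← hd, e1, ih l (k + 1) (by omega)]
    · rw [PySem.List.pyRange_one_eq_nil (by omega)]
      rw [con007Scan_short _ (by rw [List.length_drop]; omega)]
      rfl

-- B's counter loop skips non-0/7 elements, so it only sees the filtered list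
theorem con007GoB_filter (l : List Int) : ∀ c,
    con007GoB l c = con007GoB (l.filter (fun i => decide (i = 0 ∨ i = 7))) c := by
  induction l with
  | nil => intro c; rfl
  | cons x t ih =>
    intro c
    by_cases h0 : x = 0
    · subst h0; simpa [con007GoB, List.filter] using ih (c + 1)
    · by_cases h7 : x = 7
      · subst h7
        by_cases hc : (2 : Int) ≤ c
        · simp [con007GoB, List.filter, hc]
        · simpa [con007GoB, List.filter, hc] using ih 0
      · simpa [con007GoB, List.filter, h0, h7] using ih c

theorem con007Scan_replicate (n : Nat) : con007Scan (List.replicate n 0) = false := by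
  induction n with
  | zero => rfl
  | succ m ih =>
    match m, ih with
    | 0, _ => rfl
    | 1, _ => rfl
    | k + 2, ih => simpa [List.replicate_succ, con007Scan] using ih

theorem con007Scan_sevenHead (r : List Int) : con007Scan (7 :: r) = con007Scan r := by
  match r with
  | [] => rfl
  | [_] => rfl
  | _ :: _ :: _ => simp [con007Scan]

theorem con007Scan_zeros_seven (n : Nat) (r : List Int) :
    con007Scan (List.replicate n 0 ++ 7 :: r) = (decide (2 ≤ n) || con007Scan r) := by
  induction n generalizing r with
  | zero => simpa using con007Scan_sevenHead r
  | succ m ih =>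
    match m with
    | 0 =>
      simp only [List.replicate_succ, List.replicate_zero, List.nil_append, List.cons_append]
      rw [show con007Scan (0 :: 7 :: r) = con007Scan (7 :: r) from by
        match r with
        | [] => rfl
        | _ :: _ => simp [con007Scan]]
      rw [con007Scan_sevenHead]
      simp
    | 1 => simp [List.replicate_succ, con007Scan]
    | k + 2 =>
      have := ih (r := r)
      simp only [List.replicate_succ, List.cons_append] at this ⊢
      rw [show con007Scan (0 :: 0 :: 0 :: (List.replicate k 0 ++ 7 :: r))
            = con007Scan (0 :: 0 :: (List.replicate k 0 ++ 7 :: r)) from by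
        simp [con007Scan]]
      rw [this]
      simp

-- the counter version on an all-0/7 list equals the window scan with the counter as a zero prefix
theorem con007GoB_eq_scan (l : List Int) (h07 : ∀ x ∈ l, x = 0 ∨ x = 7) :
    ∀ c : Int, 0 ≤ c → con007GoB l c = con007Scan (List.replicate c.toNat 0 ++ l) := by
  induction l with
  | nil =>
    intro c _
    rw [show con007GoB [] c = false from rfl, List.append_nil, con007Scan_replicate c.toNat]
  | cons x t ih =>
    intro c hc
    have hx := h07 x (by simp)
    have ht : ∀ y ∈ t, y = 0 ∨ y = 7 := fun y hy => h07 y (by simp [hy])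
    rcases hx with h0 | h7
    · subst h0
      rw [con007GoB, if_pos rfl, ih ht (c + 1) (by omega)]
      congr 1
      have : (c + 1).toNat = c.toNat + 1 := by omega
      rw [this, List.replicate_succ']
      simp
    · subst h7
      rw [con007GoB, con007Scan_zeros_seven]
      rw [if_neg (by norm_num : ¬ (7 : Int) = 0), if_pos rfl]
      by_cases h2 : (2 : Int) ≤ c
      · have h2' : 2 ≤ c.toNat := by omega
        rw [if_pos h2]
        simp [h2']
      · have hn : ¬ 2 ≤ c.toNat := by omega
        rw [if_neg h2, ih ht 0 le_rfl]
        simp [hn]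

-- ===== VERDICT (by name: the statement is the Claim_ definition above) =====
theorem con_007_spec : Claim_equal_con_007 := by
  intro arr _
  unfold Spec_con_007 con_007 con_007_alt
  simp only
  rw [PySem.List.foldl_append_ite_eq_filter]
  simp only [List.nil_append]
  set f := arr.filter (fun i => decide (i = 0 ∨ i = 7)) with hf
  have hA : con007LoopA f (PySem.List.pyRange 0 ((f.length : Int) - 2) 1) = con007Scan f := by
    have h := con007LoopA_eq_scan f.length f 0 (by omega)
    rw [List.drop_zero] at h
    simpa using h
  rw [hA, con007GoB_filter arr 0, ← hf,
      con007GoB_eq_scan f (by intro x hx; rw [hf] at hx; simpa using (List.mem_filter.mp hx).2) 0 le_rfl]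
  simp
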